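-- pv_equiv track=rewrite | github.com/Aculeasis/mdmTerminal2 | src/lib/map_settings/wiki_parser.py | settings_list_to_sections
-- ===== SOURCE A (Python) =====
-- def settings_list_to_sections(cfg: list) -> dict:
--     result = {}
--     section = None
--     for line in cfg:
--         if line.startswith('[') and line.endswith(']'):
--             section = line[1:-1]
--             result[section] = []
--         elif section:
--             result[section].append(line)
--     return result
-- ===== SOURCE B (Python) =====
-- def settings_list_to_sections(cfg: list) -> dict:
--     def is_header(line):
--         return line.startswith('[') and line.endswith(']')
--     result = {}
--     n = len(cfg)
--     i = 0
--     # skip everything before the first header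
--     while i < n and not is_header(cfg[i]):
--         i += 1
--     # one section per iteration: a header, then the span of body lines up to the next header
--     while i < n:
--         j = i + 1
--         while j < n and not is_header(cfg[j]):
--             j += 1
--         result[cfg[i][1:-1]] = cfg[i + 1:j]
--         i = j
--     return result
-- ===== Notes on version B (the rewrite author's own statement) =====
-- stated objective: alternative
-- what changed: B parses section-at-a-time (skip the pre-header preamble, then repeatedly take one header and the whole span of body lines up to the next header and assign that slice as the section's body) instead of A's line-at-a-time loop with a current-section register and per-line dict append.
-- intended difference: On inputs whose last empty-named header line (an opening bracket immediately followed by a closing bracket) is immediately followed by a non-header line, A returns an empty body for the empty-named section (its truthiness test `elif section:` silently drops those lines while keeping the key), while B returns those body lines, which is what an INI-style parser is meant to produce. — e.g. on settings_list_to_sections(["[]", "x"]): A returns [("", [])], B returns [("", ["x"])]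
import Mathlib
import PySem

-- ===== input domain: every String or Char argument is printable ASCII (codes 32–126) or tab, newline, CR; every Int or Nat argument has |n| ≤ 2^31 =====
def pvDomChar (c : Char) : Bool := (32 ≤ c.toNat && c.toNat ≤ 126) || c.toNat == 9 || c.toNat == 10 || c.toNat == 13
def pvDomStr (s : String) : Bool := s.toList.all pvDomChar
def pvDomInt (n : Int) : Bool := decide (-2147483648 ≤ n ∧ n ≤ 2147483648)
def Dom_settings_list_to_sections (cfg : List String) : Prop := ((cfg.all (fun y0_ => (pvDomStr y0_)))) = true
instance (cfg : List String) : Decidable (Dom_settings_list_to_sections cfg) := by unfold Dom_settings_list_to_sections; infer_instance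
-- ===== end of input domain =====

-- B re-parses the list section-at-a-time (skip the preamble, then one header plus its span of body
-- lines per step) instead of A's line-at-a-time loop with a current-section register and per-line
-- dict mutation; on the corner where the last "[]" header is followed by body lines B keeps those
-- lines while A drops them (see D_ below).

-- ===== PORT A =====
def pvIsHeader (l : String) : Bool := PySem.Str.startswith l "[" && PySem.Str.endswith l "]"

def pvSecName (l : String) : String := PySem.Str.slice l (some 1) (some (-1))   -- line[1:-1]

-- state: (result, section); `elif section:` is Python truthiness (None and "" both skip).
-- `result[section].append(line)` is Dict.modify with default []; the default is never used, because
-- whenever section is set its key is already present (so this is exact — A never hits a KeyError).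
def pvGoA (d : PySem.Dict String (List String)) (sec : Option String) :
    List String → PySem.Dict String (List String)
  | [] => d
  | l :: rest =>
    if pvIsHeader l then
      pvGoA (d.insert (pvSecName l) []) (some (pvSecName l)) rest
    else
      match sec with
      | some s => if s = "" then pvGoA d (some s) rest
                  else pvGoA (d.modify s [] (fun b => b ++ [l])) (some s) rest
      | none => pvGoA d none rest

def settings_list_to_sections (cfg : List String) : List (String × List String) :=
  (pvGoA PySem.Dict.empty none cfg).items

-- ===== PORT B =====
-- `while cfg and not is_header(cfg[0]): cfg = cfg[1:]`
def pvDropPre : List String → List String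
  | [] => []
  | l :: rest => if pvIsHeader l then l :: rest else pvDropPre rest

-- the inner `while` loop: collect body lines up to the next header; returns (body, remaining cfg)
def pvSpan : List String → List String × List String
  | [] => ([], [])
  | l :: rest =>
    if pvIsHeader l then ([], l :: rest)
    else ((l :: (pvSpan rest).1), (pvSpan rest).2)

theorem pvSpan_snd_length : ∀ l : List String, (pvSpan l).2.length ≤ l.length := by
  intro l
  induction l with
  | nil => simp [pvSpan]
  | cons x rest ih =>
    simp only [pvSpan]
    split
    · simp
    · simpa using Nat.le_succ_of_le ih

-- the outer `while cfg:` loop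
def pvGoB (d : PySem.Dict String (List String)) :
    List String → PySem.Dict String (List String)
  | [] => d
  | h :: rest => pvGoB (d.insert (pvSecName h) (pvSpan rest).1) (pvSpan rest).2
termination_by l => l.length
decreasing_by exact Nat.lt_succ_of_le (pvSpan_snd_length rest)

def settings_list_to_sections_alt (cfg : List String) : List (String × List String) :=
  (pvGoB PySem.Dict.empty (pvDropPre cfg)).items

-- ===== PRECONDITION & SPEC =====
-- On inputs whose last empty-named header line (an opening bracket immediately followed by a
-- closing bracket) is immediately followed by a non-header line, A returns an empty body for the
-- empty-named section (its truthiness test `elif section:` silently drops those lines while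
-- keeping the key), whereas B returns those body lines — the value an INI-style parser is meant
-- to produce.
def D_settings_list_to_sections (cfg : List String) : Prop :=
  ∃ i < cfg.length, cfg.getD i "" = "[]" ∧
    (∀ j < cfg.length, i < j → cfg.getD j "" ≠ "[]") ∧
    i + 1 < cfg.length ∧ pvIsHeader (cfg.getD (i + 1) "") = false
instance (cfg : List String) : Decidable (D_settings_list_to_sections cfg) := by
  unfold D_settings_list_to_sections; infer_instance

def Spec_settings_list_to_sections (cfg : List String) (out : List (String × List String)) : Prop :=
  ¬ D_settings_list_to_sections cfg → out = settings_list_to_sections_alt cfg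
instance (cfg : List String) (out : List (String × List String)) :
    Decidable (Spec_settings_list_to_sections cfg out) := by
  unfold Spec_settings_list_to_sections; infer_instance

def pvDiffWitness_settings_list_to_sections : List String := ["[]", "x"]
def pvDiffWitnessOut_settings_list_to_sections :
    (List (String × List String)) × (List (String × List String)) :=
  ([("", [])], [("", ["x"])])

-- ===== CLAIM (what is proved, stated in full; the proofs are below) =====
def Claim_unchanged_settings_list_to_sections : Prop := ∀ (cfg : List String), Dom_settings_list_to_sections cfg → Spec_settings_list_to_sections cfg (settings_list_to_sections cfg)
def Claim_changed_settings_list_to_sections : Prop := Dom_settings_list_to_sections (pvDiffWitness_settings_list_to_sections) ∧ D_settings_list_to_sections (pvDiffWitness_settings_list_to_sections) ∧ settings_list_to_sections (pvDiffWitness_settings_list_to_sections) = pvDiffWitnessOut_settings_list_to_sections.1 ∧ settings_list_to_sections_alt (pvDiffWitness_settings_list_to_sections) = pvDiffWitnessOut_settings_list_to_sections.2 ∧ pvDiffWitnessOut_settings_list_to_sections.1 ≠ pvDiffWitnessOut_settings_list_to_sections.2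
def Claim_exact_settings_list_to_sections : Prop := ∀ (cfg : List String), Dom_settings_list_to_sections cfg → D_settings_list_to_sections cfg → settings_list_to_sections cfg ≠ settings_list_to_sections_alt cfg

-- ===== LEMMAS AND PROOFS =====

-- mask a (key, body) pair: forget the body stored under the empty key
def pvMask (p : String × List String) : String × List String :=
  if p.1 = "" then (p.1, []) else p

def pvM (d : PySem.Dict String (List String)) : List (String × List String) :=
  d.items.map pvMask

theorem pvMask_fst (p : String × List String) : (pvMask p).1 = p.1 := by
  unfold pvMask; split <;> rfl

theorem pvKeys_eq_of_pvM_eq (d d' : PySem.Dict String (List String))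
    (h : pvM d = pvM d') : d.keys = d'.keys := by
  have h2 := congrArg (List.map Prod.fst) h
  simpa [pvM, List.map_map, Function.comp_def, pvMask_fst, PySem.Dict.keys] using h2

theorem pvModify_insert (d : PySem.Dict String (List String)) (s : String)
    (v : List String) (x : String) :
    ((d.insert s v).modify s [] (fun b => b ++ [x])) = d.insert s (v ++ [x]) := by
  simp [PySem.Dict.modify, PySem.Dict.getD_insert_self, PySem.Dict.insert_insert_self]

theorem pvM_insert (d d' : PySem.Dict String (List String)) (k : String)
    (v w : List String) (h : pvM d = pvM d') (hvw : pvMask (k, v) = pvMask (k, w)) :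
    pvM (d.insert k v) = pvM (d'.insert k w) := by
  have hc : d.contains k = d'.contains k := by
    rw [PySem.Dict.contains_eq_decide_mem_keys, PySem.Dict.contains_eq_decide_mem_keys,
      pvKeys_eq_of_pvM_eq d d' h]
  by_cases hk : d.contains k = true
  · unfold pvM
    rw [PySem.Dict.items_insert_of_contains _ _ hk,
      PySem.Dict.items_insert_of_contains _ _ (by rw [← hc]; exact hk)]
    show (d.items.map _).map pvMask = (d'.items.map _).map pvMask
    rw [List.map_map, List.map_map]
    have key : ∀ (u : List String),
        (pvMask ∘ fun p => if (p.1 == k) = true then (k, u) else p)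
          = (fun q => if (q.1 == k) = true then pvMask (k, u) else q) ∘ pvMask := by
      intro u; funext p
      simp only [Function.comp]
      by_cases hp : p.1 = k
      · simp [hp, pvMask_fst]
      · simp [hp, pvMask_fst, beq_iff_eq]
    rw [key v, key w, ← List.map_map, ← List.map_map]
    show (pvM d).map _ = (pvM d').map _
    rw [h, hvw]
  · have hk' : d'.contains k = false := by rw [← hc]; simpa using hk
    unfold pvM
    rw [PySem.Dict.items_insert_of_not_contains _ _ (by simpa using hk),
      PySem.Dict.items_insert_of_not_contains _ _ hk']
    show (d.items ++ _).map pvMask = (d'.items ++ _).map pvMask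
    simp only [List.map_append, List.map_cons, List.map_nil]
    have h' : List.map pvMask d.items = List.map pvMask d'.items := h
    rw [h', hvw]

theorem pvSpan_append (l : List String) : (pvSpan l).1 ++ (pvSpan l).2 = l := by
  induction l with
  | nil => simp [pvSpan]
  | cons x rest ih =>
    simp only [pvSpan]; split
    · simp
    · simpa using ih

theorem pvSpan_fst_nonheader (l : List String) :
    ∀ x ∈ (pvSpan l).1, pvIsHeader x = false := by
  induction l with
  | nil => simp [pvSpan]
  | cons y rest ih =>
    simp only [pvSpan]
    split
    · simp
    · intro x hx
      rcases List.mem_cons.mp hx with h | h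
      · subst h; simp_all
      · exact ih x h

theorem pvSpan_snd_headerStart (l : List String) :
    (pvSpan l).2 = [] ∨ ∃ h t, (pvSpan l).2 = h :: t ∧ pvIsHeader h = true := by
  induction l with
  | nil => simp [pvSpan]
  | cons x rest ih =>
    simp only [pvSpan]
    split
    · next hx => exact Or.inr ⟨x, rest, rfl, hx⟩
    · simpa using ih

theorem pvGoA_dropPre (cfg : List String) (d : PySem.Dict String (List String)) :
    pvGoA d none cfg = pvGoA d none (pvDropPre cfg) := by
  induction cfg with
  | nil => rfl
  | cons l rest ih =>
    simp only [pvGoA, pvDropPre]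
    split
    · simp only [pvGoA]; simp_all
    · exact ih

theorem pvDropPre_suffix (cfg : List String) : ∃ w, cfg = w ++ pvDropPre cfg := by
  induction cfg with
  | nil => exact ⟨[], rfl⟩
  | cons l rest ih =>
    by_cases h : pvIsHeader l
    · exact ⟨[], by simp [pvDropPre, h]⟩
    · obtain ⟨w, hw⟩ := ih
      exact ⟨l :: w, by simp [pvDropPre, h]; exact hw⟩

theorem pvDropPre_headerStart (cfg : List String) :
    pvDropPre cfg = [] ∨ ∃ h t, pvDropPre cfg = h :: t ∧ pvIsHeader h = true := by
  induction cfg with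
  | nil => simp [pvDropPre]
  | cons l rest ih =>
    by_cases h : pvIsHeader l
    · exact Or.inr ⟨l, rest, by simp [pvDropPre, h], h⟩
    · simpa [pvDropPre, h] using ih

theorem pvMem_dropPre (cfg : List String) (x : String) (hx : pvIsHeader x = true) :
    x ∈ pvDropPre cfg ↔ x ∈ cfg := by
  induction cfg with
  | nil => simp [pvDropPre]
  | cons l rest ih =>
    by_cases h : pvIsHeader l
    · simp [pvDropPre, h]
    · have : x ≠ l := by rintro rfl; simp_all
      simp [pvDropPre, h, ih, this]

theorem pvBodyA_ne (s : String) (hs : s ≠ "") :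
    ∀ (body r : List String) (d : PySem.Dict String (List String)) (v : List String),
      (∀ x ∈ body, pvIsHeader x = false) →
      pvGoA (d.insert s v) (some s) (body ++ r) = pvGoA (d.insert s (v ++ body)) (some s) r := by
  intro body
  induction body with
  | nil => intro r d v _; simp
  | cons x body ih =>
    intro r d v hb
    have hx : pvIsHeader x = false := hb x (by simp)
    simp only [List.cons_append, pvGoA, hx, Bool.false_eq_true, if_false, hs]
    rw [pvModify_insert, ih r d (v ++ [x]) (fun y hy => hb y (by simp [hy]))]
    simp

theorem pvBodyA_empty :
    ∀ (body r : List String) (d : PySem.Dict String (List String)),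
      (∀ x ∈ body, pvIsHeader x = false) →
      pvGoA d (some "") (body ++ r) = pvGoA d (some "") r := by
  intro body
  induction body with
  | nil => intro r d _; simp
  | cons x body ih =>
    intro r d hb
    have hx : pvIsHeader x = false := hb x (by simp)
    simp only [List.cons_append, pvGoA, hx, Bool.false_eq_true, if_false, ite_true]
    exact ih r d (fun y hy => hb y (by simp [hy]))

theorem pvMain : ∀ (n : Nat) (cfg : List String), cfg.length ≤ n →
    (cfg = [] ∨ ∃ h t, cfg = h :: t ∧ pvIsHeader h = true) →
    ∀ (d d' : PySem.Dict String (List String)) (sec : Option String),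
      pvM d = pvM d' → pvM (pvGoA d sec cfg) = pvM (pvGoB d' cfg) := by
  intro n
  induction n with
  | zero =>
    intro cfg hlen _ d d' sec h
    have hc : cfg = [] := by cases cfg with | nil => rfl | cons a b => simp at hlen
    subst hc
    simpa [pvGoA, pvGoB] using h
  | succ n ih =>
    intro cfg hlen hhs d d' sec h
    rcases hhs with rfl | ⟨hd, t, rfl, hH⟩
    · simpa [pvGoA, pvGoB] using h
    · simp only [pvGoA, hH, if_true]
      rw [pvGoB]
      have hlen' : (pvSpan t).2.length ≤ n := by
        have h1 := pvSpan_snd_length t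
        simp only [List.length_cons] at hlen
        omega
      have hhs' := pvSpan_snd_headerStart t
      have hbody := pvSpan_fst_nonheader t
      have hsplit := pvSpan_append t
      by_cases hs : pvSecName hd = ""
      · have hA : pvGoA (d.insert (pvSecName hd) []) (some (pvSecName hd)) t
            = pvGoA (d.insert (pvSecName hd) []) (some (pvSecName hd)) (pvSpan t).2 := by
          conv_lhs => rw [← hsplit]
          rw [hs]
          exact pvBodyA_empty _ _ _ hbody
        rw [hA]
        apply ih _ hlen' hhs'
        exact pvM_insert _ _ _ _ _ h (by simp [pvMask, hs])
      · have hA : pvGoA (d.insert (pvSecName hd) []) (some (pvSecName hd)) t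
            = pvGoA (d.insert (pvSecName hd) (pvSpan t).1) (some (pvSecName hd)) (pvSpan t).2 := by
          conv_lhs => rw [← hsplit]
          rw [pvBodyA_ne _ hs _ _ _ _ hbody]
          simp
        rw [hA]
        apply ih _ hlen' hhs'
        exact pvM_insert _ _ _ _ _ h rfl

theorem pvSlice11 (cs : List Char) :
    PySem.List.slice cs (some 1) (some (-1)) = cs.tail.dropLast := by
  cases cs with
  | nil => simp [PySem.List.slice]
  | cons c cs =>
    simp [PySem.List.slice]
    exact List.dropLast_eq_take.symm

theorem pvSecName_toList (l : String) :
    (pvSecName l).toList = l.toList.tail.dropLast := by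
  unfold pvSecName
  rw [PySem.Str.toList_slice]
  simp [pvSlice11]

theorem pvSecName_empty_iff (l : String) (hl : pvIsHeader l = true) :
    pvSecName l = "" ↔ l = "[]" := by
  unfold pvIsHeader at hl
  rw [Bool.and_eq_true, PySem.Str.startswith_eq, PySem.Str.endswith_eq] at hl
  obtain ⟨h1, h2⟩ := hl
  rw [PySem.Chars.startswith_iff] at h1
  rw [PySem.Chars.endswith_iff] at h2
  constructor
  · intro h
    have ht : (pvSecName l).toList = [] := by rw [h]; rfl
    rw [pvSecName_toList] at ht
    obtain ⟨m, hm⟩ := h1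
    have hm' : l.toList = '[' :: m := by simpa using hm.symm
    rw [hm'] at ht h2
    simp only [List.tail_cons] at ht
    obtain ⟨u, hu⟩ := h2
    rw [← String.toList_inj, hm']
    rcases List.eq_nil_or_concat m with rfl | ⟨v, a, rfl⟩
    · exfalso
      rcases u with _ | ⟨b, u⟩
      · simp at hu
      · have := congrArg List.length hu; simp at this
    · have hv : v = [] := by simpa using ht
      subst hv
      have h3 := congrArg List.getLast? hu
      simp at h3
      subst h3
      rfl
  · intro h; subst h
    rw [← String.toList_inj, pvSecName_toList]
    rfl

theorem pvHeaderBrackets : pvIsHeader "[]" = true := by decide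

theorem pvGetA (cfg : List String) :
    ∀ (d : PySem.Dict String (List String)) (sec : Option String),
      (pvGoA d sec cfg).get? "" = if "[]" ∈ cfg then some [] else d.get? "" := by
  induction cfg with
  | nil => intro d sec; simp [pvGoA]
  | cons l rest ih =>
    intro d sec
    by_cases hH : pvIsHeader l = true
    · simp only [pvGoA, hH, if_true]
      rw [ih]
      by_cases hl : l = "[]"
      · have hs : pvSecName l = "" := (pvSecName_empty_iff l hH).mpr hl
        subst hl
        simp [hs, PySem.Dict.get?_insert_self]
      · have hs : pvSecName l ≠ "" := fun h => hl ((pvSecName_empty_iff l hH).mp h)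
        rw [PySem.Dict.get?_insert_of_ne d [] (Ne.symm hs)]
        have : ("[]" = l) = False := by simp [eq_comm]; exact hl
        simp [List.mem_cons, this]
    · have hl : l ≠ "[]" := by rintro rfl; exact hH pvHeaderBrackets
      simp only [pvGoA, hH, Bool.false_eq_true, if_false]
      have hmem : ("[]" ∈ l :: rest) = ("[]" ∈ rest) := by simp [List.mem_cons, Ne.symm hl]
      match sec with
      | none => rw [ih]; simp [hmem]
      | some s =>
        by_cases hs : s = ""
        · simp only [hs, if_true]
          rw [ih]; simp [hmem]
        · simp only [hs, if_false]
          rw [ih]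
          simp only [PySem.Dict.modify]
          rw [PySem.Dict.get?_insert_of_ne _ _ (Ne.symm hs)]
          simp [hmem]

-- "the last empty-named header line, if any, is immediately followed by a header or the list's end"
def pvTailOK (cfg : List String) : Prop :=
  ∀ u v, cfg = u ++ "[]" :: v → "[]" ∉ v →
    v = [] ∨ ∃ h t, v = h :: t ∧ pvIsHeader h = true

theorem pvTailOK_suffix (w c : List String) (h : pvTailOK (w ++ c)) : pvTailOK c := by
  intro u v hc hv
  exact h (w ++ u) v (by simp [hc]) hv

theorem pvTailOK_of_not_D (cfg : List String)
    (hD : ¬ D_settings_list_to_sections cfg) : pvTailOK cfg := by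
  intro u v hc hv
  by_contra hne
  obtain ⟨hv0, hne⟩ := not_or.mp hne
  cases v with
  | nil => exact hv0 rfl
  | cons h0 t =>
    have hh0 : pvIsHeader h0 = false := by
      cases hb : pvIsHeader h0
      · rfl
      · exact absurd ⟨h0, t, rfl, hb⟩ hne
    apply hD
    refine ⟨u.length, ?_, ?_, ?_, ?_, ?_⟩
    · subst hc; simp
    · subst hc
      rw [List.getD_eq_getElem?_getD, List.getElem?_append_right (le_refl u.length)]
      simp
    · intro j hj hij
      subst hc
      rw [List.getD_eq_getElem?_getD, List.getElem?_append_right (by omega)]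
      have hidx : j - u.length = (j - u.length - 1) + 1 := by omega
      rw [hidx]
      simp only [List.getElem?_cons_succ]
      intro hmem
      apply hv
      apply List.mem_of_getElem? (l := h0 :: t) (i := j - u.length - 1)
      have hjlen : j - u.length - 1 < (h0 :: t).length := by
        simp only [List.length_append, List.length_cons] at hj ⊢
        omega
      rw [List.getElem?_eq_getElem hjlen]
      rw [List.getElem?_eq_getElem hjlen] at hmem
      simpa using hmem
    · subst hc; simp
    · subst hc
      rw [List.getD_eq_getElem?_getD, List.getElem?_append_right (by omega)]
      have : u.length + 1 - u.length = 1 := by omega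
      rw [this]
      simpa using hh0

theorem pvGetB : ∀ (n : Nat) (cfg : List String), cfg.length ≤ n →
    (cfg = [] ∨ ∃ h t, cfg = h :: t ∧ pvIsHeader h = true) → pvTailOK cfg →
    ∀ (d : PySem.Dict String (List String)),
      (pvGoB d cfg).get? "" = if "[]" ∈ cfg then some [] else d.get? "" := by
  intro n
  induction n with
  | zero =>
    intro cfg hlen _ _ d
    have hc : cfg = [] := by cases cfg with | nil => rfl | cons a b => simp at hlen
    subst hc
    simp [pvGoB]
  | succ n ih =>
    intro cfg hlen hhs htail d
    rcases hhs with rfl | ⟨hd, t, rfl, hH⟩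
    · simp [pvGoB]
    · rw [pvGoB]
      have hlen' : (pvSpan t).2.length ≤ n := by
        have h1 := pvSpan_snd_length t
        simp only [List.length_cons] at hlen
        omega
      have hhs' := pvSpan_snd_headerStart t
      have hbody := pvSpan_fst_nonheader t
      have hsplit := pvSpan_append t
      have htail' : pvTailOK (pvSpan t).2 := by
        apply pvTailOK_suffix (hd :: (pvSpan t).1)
        simpa [hsplit] using htail
      rw [ih _ hlen' hhs' htail']
      have hbodymem : "[]" ∉ (pvSpan t).1 := by
        intro hm
        have := hbody _ hm
        rw [pvHeaderBrackets] at this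
        exact absurd this (by simp)
      by_cases hhd : hd = "[]"
      · subst hhd
        have hs : pvSecName "[]" = "" := (pvSecName_empty_iff _ pvHeaderBrackets).mpr rfl
        by_cases hr : "[]" ∈ (pvSpan t).2
        · rw [if_pos hr, if_pos (show ("[]" : String) ∈ "[]" :: t by simp)]
        · rw [if_neg hr]
          have hnt : "[]" ∉ t := by
            rw [← hsplit]
            simp only [List.mem_append]
            rintro (h | h)
            · exact hbodymem h
            · exact hr h
          have hb0 : (pvSpan t).1 = [] := by
            rcases htail [] t rfl hnt with rfl | ⟨h', t', rfl, hh'⟩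
            · simp [pvSpan]
            · simp [pvSpan, hh']
          rw [hb0, hs, PySem.Dict.get?_insert_self,
            if_pos (show ("[]" : String) ∈ "[]" :: t by simp)]
      · have hs : pvSecName hd ≠ "" := fun h => hhd ((pvSecName_empty_iff hd hH).mp h)
        rw [PySem.Dict.get?_insert_of_ne _ _ (Ne.symm hs)]
        have hmem : ("[]" ∈ hd :: t) ↔ ("[]" ∈ (pvSpan t).2) := by
          constructor
          · intro hm
            rcases List.mem_cons.mp hm with h | h
            · exact absurd h.symm hhd
            · rw [← hsplit] at h
              rcases List.mem_append.mp h with h | h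
              · exact absurd h hbodymem
              · exact h
          · intro hm
            apply List.mem_cons_of_mem
            rw [← hsplit]
            exact List.mem_append_right _ hm
        by_cases hr : "[]" ∈ (pvSpan t).2
        · rw [if_pos hr, if_pos (hmem.mpr hr)]
        · rw [if_neg hr, if_neg (fun h => hr (hmem.mp h))]

theorem pvNodupA (cfg : List String) :
    ∀ (d : PySem.Dict String (List String)) (sec : Option String),
      d.keys.Nodup → (pvGoA d sec cfg).keys.Nodup := by
  induction cfg with
  | nil => intro d sec h; exact h
  | cons l rest ih =>
    intro d sec h
    by_cases hH : pvIsHeader l = true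
    · simp only [pvGoA, hH, if_true]
      exact ih _ _ (PySem.Dict.nodup_keys_insert _ _ _ h)
    · simp only [pvGoA, hH, Bool.false_eq_true, if_false]
      match sec with
      | none => exact ih _ _ h
      | some s =>
        by_cases hs : s = ""
        · simp only [hs, ite_true]; exact ih _ _ h
        · simp only [hs, ite_false]
          exact ih _ _ (by simp only [PySem.Dict.modify]; exact PySem.Dict.nodup_keys_insert _ _ _ h)

theorem pvItems_eq (xs : List (String × List String)) :
    ∀ ys : List (String × List String), xs.map pvMask = ys.map pvMask →
      (PySem.Dict.mk xs).get? "" = (PySem.Dict.mk ys).get? "" →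
      (xs.map Prod.fst).Nodup → xs = ys := by
  induction xs with
  | nil => intro ys h _ _; simpa using h.symm
  | cons x xs ih =>
    intro ys h hg hn
    cases ys with
    | nil => simp at h
    | cons y ys =>
      simp only [List.map_cons, List.cons.injEq] at h
      obtain ⟨h1, h2⟩ := h
      have hfst : x.1 = y.1 := by
        have := congrArg Prod.fst h1
        simpa [pvMask, apply_ite Prod.fst] using this
      by_cases hx : x.1 = ""
      · have hy : y.1 = "" := by rw [← hfst]; exact hx
        have hgx : (PySem.Dict.mk (x :: xs)).get? "" = some x.2 := by
          cases x with | mk a b =>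
          simp only at hx; subst hx
          simp [PySem.Dict.get?_mk_cons]
        have hgy : (PySem.Dict.mk (y :: ys)).get? "" = some y.2 := by
          cases y with | mk a b =>
          simp only at hy; subst hy
          simp [PySem.Dict.get?_mk_cons]
        have hv : x.2 = y.2 := by
          have := hg; rw [hgx, hgy] at this; exact Option.some_injective _ this
        have hxy : x = y := Prod.ext hfst hv
        subst hxy
        have hnx : "" ∉ xs.map Prod.fst := by
          simp only [List.map_cons, List.nodup_cons] at hn
          rw [← hx]; exact hn.1
        have hny : "" ∉ ys.map Prod.fst := by
          have := congrArg (List.map Prod.fst) h2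
          simp only [List.map_map, Function.comp_def] at this
          have heq : xs.map Prod.fst = ys.map Prod.fst := by
            have hh : ∀ (zs : List (String × List String)),
                zs.map (fun p => (pvMask p).1) = zs.map Prod.fst := by
              intro zs; apply List.map_congr_left; intro p _; simp [pvMask]; split <;> rfl
            rw [← hh xs, ← hh ys]
            exact this
          rw [← heq]; exact hnx
        have hgx' : (PySem.Dict.mk xs).get? "" = none := by
          rw [PySem.Dict.get?_eq_none_iff_not_mem_keys]
          simpa [PySem.Dict.keys] using hnx
        have hgy' : (PySem.Dict.mk ys).get? "" = none := by
          rw [PySem.Dict.get?_eq_none_iff_not_mem_keys]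
          simpa [PySem.Dict.keys] using hny
        have := ih ys h2 (hgx'.trans hgy'.symm)
          (by simp only [List.map_cons, List.nodup_cons] at hn; exact hn.2)
        rw [this]
      · have hxy : x = y := by
          have hx1 : pvMask x = x := by simp [pvMask, hx]
          have hy1 : pvMask y = y := by simp [pvMask, hfst ▸ hx]
          rw [← hx1, ← hy1, h1]
        subst hxy
        have hg' : (PySem.Dict.mk xs).get? "" = (PySem.Dict.mk ys).get? "" := by
          cases x with | mk a b =>
          simp only [PySem.Dict.get?_mk_cons] at hg
          have : (a == "") = false := by simpa using hx
          rw [this] at hg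
          simpa using hg
        exact congrArg _ (ih ys h2 hg'
          (by simp only [List.map_cons, List.nodup_cons] at hn; exact hn.2))

-- ----- lemmas for the tight claim: inside D_ the two results actually differ -----

-- "the last empty-named header line is immediately followed by a non-header line"
def pvTailBad (cfg : List String) : Prop :=
  ∃ u v h t, cfg = u ++ "[]" :: v ∧ "[]" ∉ v ∧ v = h :: t ∧ pvIsHeader h = false

theorem pvMem_of_D (cfg : List String) (hD : D_settings_list_to_sections cfg) :
    "[]" ∈ cfg := by
  obtain ⟨i, hi, hget, -, -, -⟩ := hD
  rw [List.getD_eq_getElem cfg "" hi] at hget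
  exact hget ▸ List.getElem_mem hi

theorem pvTailBad_of_D (cfg : List String) (hD : D_settings_list_to_sections cfg) :
    pvTailBad cfg := by
  obtain ⟨i, hi, hget, hlast, hi1, hnh⟩ := hD
  rw [List.getD_eq_getElem cfg "" hi] at hget
  rw [List.getD_eq_getElem cfg "" hi1] at hnh
  refine ⟨cfg.take i, cfg.drop (i + 1), cfg[i + 1], cfg.drop (i + 2), ?_, ?_, ?_, hnh⟩
  · conv_lhs => rw [← List.take_append_drop i cfg]
    rw [List.drop_eq_getElem_cons hi, hget]
  · intro hm
    obtain ⟨k, hk, hkeq⟩ := List.mem_iff_getElem.mp hm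
    rw [List.getElem_drop] at hkeq
    have hjlt : i + 1 + k < cfg.length := by
      simp only [List.length_drop] at hk
      omega
    apply hlast (i + 1 + k) hjlt (by omega)
    rw [List.getD_eq_getElem cfg "" hjlt]
    exact hkeq
  · exact List.drop_eq_getElem_cons hi1

theorem pvTailBad_suffix_last (w c : List String) (hm : "[]" ∈ c)
    (h : pvTailBad (w ++ c)) : pvTailBad c := by
  obtain ⟨u, v, h0, t, hcfg, hv, hvht, hh⟩ := h
  have hs1 : ("[]" :: v) <:+ (w ++ c) := ⟨u, hcfg.symm⟩
  have hs2 : c <:+ (w ++ c) := ⟨w, rfl⟩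
  rcases List.suffix_or_suffix_of_suffix hs1 hs2 with hs | hs
  · obtain ⟨u', hu'⟩ := hs
    exact ⟨u', v, h0, t, hu'.symm, hv, hvht, hh⟩
  · rcases List.suffix_cons_iff.mp hs with hc | hc
    · exact ⟨[], v, h0, t, by simpa using hc, hv, hvht, hh⟩
    · exact absurd (hc.subset hm) hv

theorem pvTailOK_of_not_mem (c : List String) (h : "[]" ∉ c) : pvTailOK c := by
  intro u v hc _
  exact absurd (hc ▸ List.mem_append_right u (List.mem_cons_self)) h

theorem pvGetB_bad : ∀ (n : Nat) (cfg : List String), cfg.length ≤ n →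
    (cfg = [] ∨ ∃ h t, cfg = h :: t ∧ pvIsHeader h = true) → pvTailBad cfg →
    ∀ (d : PySem.Dict String (List String)),
      ∃ b, b ≠ [] ∧ (pvGoB d cfg).get? "" = some b := by
  intro n
  induction n with
  | zero =>
    intro cfg hlen _ hbad d
    have hc : cfg = [] := by cases cfg with | nil => rfl | cons a b => simp at hlen
    subst hc
    obtain ⟨u, v, h0, t, hcfg, -, -, -⟩ := hbad
    exact absurd hcfg.symm (by simp)
  | succ n ih =>
    intro cfg hlen hhs hbad d
    rcases hhs with rfl | ⟨hd, t, rfl, hH⟩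
    · obtain ⟨u, v, h0, t, hcfg, -, -, -⟩ := hbad
      exact absurd hcfg.symm (by simp)
    · rw [pvGoB]
      have hlen' : (pvSpan t).2.length ≤ n := by
        have h1 := pvSpan_snd_length t
        simp only [List.length_cons] at hlen
        omega
      have hhs' := pvSpan_snd_headerStart t
      have hbody := pvSpan_fst_nonheader t
      have hsplit := pvSpan_append t
      have hbodymem : "[]" ∉ (pvSpan t).1 := by
        intro hm
        have := hbody _ hm
        rw [pvHeaderBrackets] at this
        exact absurd this (by simp)
      by_cases hr : "[]" ∈ (pvSpan t).2
      · exact ih _ hlen' hhs'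
          (pvTailBad_suffix_last (hd :: (pvSpan t).1) _ hr (by simpa [hsplit] using hbad)) _
      · -- the last "[]" is hd itself, and its body is nonempty
        obtain ⟨u, v, h0, t0, hcfg, hv, hvht, hh0⟩ := hbad
        have hnt : "[]" ∉ t := by
          rw [← hsplit]
          simp only [List.mem_append]
          rintro (h | h)
          · exact hbodymem h
          · exact hr h
        have hu : u = [] := by
          cases u with
          | nil => rfl
          | cons a u' =>
            exfalso
            apply hnt
            have := congrArg List.tail hcfg
            simp only [List.tail_cons] at this
            rw [this]
            exact List.mem_append_right u' (List.mem_cons_self)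
        subst hu
        simp only [List.nil_append, List.cons.injEq] at hcfg
        obtain ⟨hhd, hteq⟩ := hcfg
        subst hvht
        have hspan : pvSpan t = (h0 :: (pvSpan t0).1, (pvSpan t0).2) := by
          rw [hteq]
          simp [pvSpan, hh0]
        have hs : pvSecName hd = "" := (pvSecName_empty_iff hd hH).mpr hhd
        refine ⟨(pvSpan t).1, by rw [hspan]; simp, ?_⟩
        rw [pvGetB n _ hlen' hhs' (pvTailOK_of_not_mem _ hr), if_neg hr, hs,
          PySem.Dict.get?_insert_self]

-- ===== VERDICT (by name: the statement is the Claim_ definition above) =====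
theorem settings_list_to_sections_spec : Claim_unchanged_settings_list_to_sections := by
  intro cfg _ hD
  unfold settings_list_to_sections settings_list_to_sections_alt
  have hM : pvM (pvGoA PySem.Dict.empty none cfg) = pvM (pvGoB PySem.Dict.empty (pvDropPre cfg)) := by
    rw [pvGoA_dropPre]
    exact pvMain (pvDropPre cfg).length (pvDropPre cfg) (le_refl _)
      (pvDropPre_headerStart cfg) _ _ _ rfl
  have hG : (pvGoA PySem.Dict.empty none cfg).get? ""
      = (pvGoB PySem.Dict.empty (pvDropPre cfg)).get? "" := by
    rw [pvGetA]
    rw [pvGetB (pvDropPre cfg).length (pvDropPre cfg) (le_refl _) (pvDropPre_headerStart cfg)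
      (by obtain ⟨w, hw⟩ := pvDropPre_suffix cfg
          exact pvTailOK_suffix w _ (hw ▸ pvTailOK_of_not_D cfg hD))]
    simp only [pvMem_dropPre cfg "[]" pvHeaderBrackets]
  apply pvItems_eq _ _ hM hG
  have hnd := pvNodupA cfg PySem.Dict.empty none (PySem.Dict.nodup_keys_empty)
  simpa [PySem.Dict.keys] using hnd

theorem settings_list_to_sections_changed : Claim_changed_settings_list_to_sections := by
  unfold Claim_changed_settings_list_to_sections
  refine ⟨by decide, by decide, by decide, ?_, by decide⟩
  show settings_list_to_sections_alt ["[]", "x"] = [("", ["x"])]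
  unfold settings_list_to_sections_alt
  rw [show pvDropPre ["[]", "x"] = ["[]", "x"] from by decide]
  rw [pvGoB]
  simp only [show pvSpan ["x"] = (["x"], []) from by decide]
  rw [pvGoB]
  decide

theorem settings_list_to_sections_tight : Claim_exact_settings_list_to_sections := by
  intro cfg _ hD heq
  unfold settings_list_to_sections settings_list_to_sections_alt at heq
  have hdicts : pvGoA PySem.Dict.empty none cfg = pvGoB PySem.Dict.empty (pvDropPre cfg) :=
    PySem.Dict.ext heq
  have hA : (pvGoA PySem.Dict.empty none cfg).get? "" = some [] := by
    rw [pvGetA, if_pos (pvMem_of_D cfg hD)]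
  have hmB : "[]" ∈ pvDropPre cfg :=
    (pvMem_dropPre cfg "[]" pvHeaderBrackets).mpr (pvMem_of_D cfg hD)
  have hbad : pvTailBad (pvDropPre cfg) := by
    obtain ⟨w, hw⟩ := pvDropPre_suffix cfg
    exact pvTailBad_suffix_last w _ hmB (hw ▸ pvTailBad_of_D cfg hD)
  obtain ⟨b, hb, hgb⟩ := pvGetB_bad (pvDropPre cfg).length (pvDropPre cfg) (le_refl _)
    (pvDropPre_headerStart cfg) hbad PySem.Dict.empty
  rw [hdicts, hgb] at hA
  exact hb (Option.some_injective _ hA)
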